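-- pv_equiv track=rewrite | github.com/PayneLab/cptac | cptac/utils/ParseWikiPathways.py | fixParen
-- ===== SOURCE A (Python) =====
-- def fixParen(s):
--     """
--     @Param s:
--         A protein name that is checked for parenthesis.
--
--     @Return:
--         A list of protein names.
--
--     This function us used to fix parsing errors from the xml file of the WikiPathways release.
--     If the parameter s contains a parenthesis, it returns the protein names resulting from splitting s with a parenthesis.
--     If the parameter s doesn't contain a parenthesis, it returns a list containing the only the parameter s.
--     """
--
--     fixedList = []
--     list1 = s.split(")")
--     for i in list1:
--         i = i.strip()
--         list2 = i.split("(")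
--         for j in list2:
--             j = j.strip()
--             if j != "":
--                 fixedList.append(j)
--     return fixedList
-- ===== SOURCE B (Python) =====
-- def fixParen(s):
--     """Single linear scan over the characters: flush the buffer at every
--     parenthesis (and at the end), stripping it and keeping it if non-empty."""
--     fixedList = []
--     buf = ""
--     for ch in s:
--         if ch == "(" or ch == ")":
--             tok = buf.strip()
--             if tok != "":
--                 fixedList.append(tok)
--             buf = ""
--         else:
--             buf += ch
--     tok = buf.strip()
--     if tok != "":
--         fixedList.append(tok)
--     return fixedList
-- ===== Notes on version B (the rewrite author's own statement) =====
-- stated objective: simpler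
-- what changed: A splits the string on closing parentheses and then re-splits each stripped piece on opening parentheses inside a nested loop; B makes one linear scan over the characters with a single token buffer that is stripped and flushed at each parenthesis and at the end.
import Mathlib
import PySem

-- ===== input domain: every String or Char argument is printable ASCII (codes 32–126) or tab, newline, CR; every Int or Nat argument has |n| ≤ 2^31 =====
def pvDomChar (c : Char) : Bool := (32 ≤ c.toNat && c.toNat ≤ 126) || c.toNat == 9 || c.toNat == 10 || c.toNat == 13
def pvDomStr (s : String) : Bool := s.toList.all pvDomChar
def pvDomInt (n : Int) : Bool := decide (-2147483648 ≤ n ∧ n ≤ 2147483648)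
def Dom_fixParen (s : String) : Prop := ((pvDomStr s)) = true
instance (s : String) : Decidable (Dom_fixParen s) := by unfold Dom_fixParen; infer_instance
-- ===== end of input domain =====

-- B replaces A's split-on-')' loop containing a split-on-'(' loop by one linear scan of the
-- characters with a single token buffer (objective: simpler — one pass, one accumulator).

-- ===== PORT A =====
-- s.split(")") / i.split("(") with a nonempty literal separator is exactly PySem.Chars.splitOn on .toList
def fixParen (s : String) : List String :=
  let list1 := (PySem.Chars.splitOn s.toList [')']).map String.ofList
  list1.foldl (fun fixedList i =>
    let i := PySem.Str.strip i
    let list2 := (PySem.Chars.splitOn i.toList ['(']).map String.ofList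
    list2.foldl (fun fl j =>
      let j := PySem.Str.strip j
      if j ≠ "" then fl ++ [j] else fl) fixedList) []

-- ===== PORT B =====
-- flush: strip the buffer and append it to the result when non-empty (the repeated block in Source B)
def flushTok (fixedList : List String) (buf : String) : List String :=
  let tok := PySem.Str.strip buf
  if tok ≠ "" then fixedList ++ [tok] else fixedList

def fixParen_alt (s : String) : List String :=
  let st := s.toList.foldl
    (fun (st : List String × String) ch =>
      if ch = '(' ∨ ch = ')' then (flushTok st.1 st.2, "") else (st.1, st.2.push ch))
    ([], "")
  flushTok st.1 st.2

-- ===== PRECONDITION & SPEC =====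
def Spec_fixParen (s : String) (out : List String) : Prop := out = fixParen_alt s
instance (s : String) (out : List String) : Decidable (Spec_fixParen s out) := by unfold Spec_fixParen; infer_instance

-- ===== CLAIM (what is proved, stated in full; the proofs are below) =====
def Claim_equal_fixParen : Prop := ∀ (s : String), Dom_fixParen s → Spec_fixParen s (fixParen s)

-- ===== LEMMAS AND PROOFS =====

-- splitting on a single character, accumulator form of PySem.Chars.splitOn.go
def msAux (c : Char) : List Char → List Char → List (List Char)
  | [], cur => [cur.reverse]
  | a :: r, cur => if a = c then cur.reverse :: msAux c r [] else msAux c r (a :: cur)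

lemma go_single (c : Char) : ∀ (l : List Char) (fuel : Nat), l.length ≤ fuel → ∀ (cur : List Char) (acc : List (List Char)),
    PySem.Chars.splitOn.go [c] fuel l cur acc = acc.reverse ++ msAux c l cur := by
  intro l
  induction l with
  | nil =>
    intro fuel _ cur acc
    cases fuel <;> simp [PySem.Chars.splitOn.go, msAux]
  | cons a r ih =>
    intro fuel hf cur acc
    cases fuel with
    | zero => simp at hf
    | succ f =>
      rw [PySem.Chars.splitOn.go]
      by_cases hac : a = c
      · subst hac
        simp only [List.isPrefixOf, List.length_cons] at *
        simp [msAux, ih f (by omega)]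
      · simp [List.isPrefixOf, msAux, hac, Ne.symm hac, ih f (by simp at hf; omega)]

lemma msAux_modifyHead (c : Char) : ∀ (l cur : List Char),
    msAux c l cur = (msAux c l []).modifyHead (cur.reverse ++ ·) := by
  intro l
  induction l with
  | nil => intro cur; simp [msAux]
  | cons a r ih =>
    intro cur
    by_cases hac : a = c
    · simp [msAux, hac]
    · simp only [msAux, if_neg hac]
      rw [ih (a :: cur), ih [a], List.modifyHead_modifyHead]
      congr 1
      funext x
      simp

lemma splitOn_eq_msAux (c : Char) (l : List Char) : PySem.Chars.splitOn l [c] = msAux c l [] := by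
  rw [PySem.Chars.splitOn, go_single c l (l.length + 1) (by omega)]
  simp

lemma splitOn_single_nil (c : Char) : PySem.Chars.splitOn [] [c] = [[]] := by
  rw [splitOn_eq_msAux]; simp [msAux]

lemma msAux_ne_nil (c : Char) (l cur : List Char) : msAux c l cur ≠ [] := by
  induction l generalizing cur with
  | nil => simp [msAux]
  | cons a r ih =>
    by_cases h : a = c
    · simp [msAux, h]
    · simp only [msAux, if_neg h]; exact ih _

lemma splitOn_single_cons (c a : Char) (r : List Char) :
    PySem.Chars.splitOn (a :: r) [c] =
      if a = c then [] :: PySem.Chars.splitOn r [c]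
      else (PySem.Chars.splitOn r [c]).modifyHead (a :: ·) := by
  rw [splitOn_eq_msAux, splitOn_eq_msAux]
  by_cases hac : a = c
  · simp [msAux, hac]
  · simp only [msAux, if_neg hac]
    rw [msAux_modifyHead]
    rfl

lemma splitOn_single_ne_nil (c : Char) (l : List Char) : PySem.Chars.splitOn l [c] ≠ [] := by
  rw [splitOn_eq_msAux]; exact msAux_ne_nil c l []

-- splitting on both parentheses in one pass (the token boundaries B's scan realises)
def SB : List Char → List (List Char)
  | [] => [[]]
  | a :: r => if a = '(' ∨ a = ')' then [] :: SB r else (SB r).modifyHead (a :: ·)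

lemma SB_ne_nil (l : List Char) : SB l ≠ [] := by
  induction l with
  | nil => simp [SB]
  | cons a r ih =>
    simp only [SB]
    split
    · simp
    · cases h : SB r with
      | nil => exact absurd h ih
      | cons x y => simp [List.modifyHead]

lemma flatMap_split_eq_SB (s : List Char) :
    (PySem.Chars.splitOn s [')']).flatMap (fun p => PySem.Chars.splitOn p ['(']) = SB s := by
  induction s with
  | nil => simp [splitOn_single_nil, SB]
  | cons a r ih =>
    rw [splitOn_single_cons]
    by_cases h1 : a = ')'
    · simp only [if_pos h1, SB, h1]
      simp [List.flatMap_cons, splitOn_single_nil, ih]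
    · rw [if_neg h1]
      obtain ⟨h, t, hht⟩ : ∃ h t, PySem.Chars.splitOn r [')'] = h :: t := by
        cases hx : PySem.Chars.splitOn r [')'] with
        | nil => exact absurd hx (splitOn_single_ne_nil _ _)
        | cons x y => exact ⟨x, y, rfl⟩
      rw [hht]
      simp only [List.modifyHead, List.flatMap_cons]
      rw [splitOn_single_cons]
      by_cases h2 : a = '('
      · simp only [if_pos h2, SB, h2]
        simp only [← ih, hht, List.flatMap_cons]
        simp
      · rw [if_neg h2]
        have hSB : SB (a :: r) = (SB r).modifyHead (a :: ·) := by
          simp [SB, h1, h2]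
        rw [hSB, ← ih, hht, List.flatMap_cons]
        obtain ⟨h', t', hht'⟩ : ∃ h' t', PySem.Chars.splitOn h ['('] = h' :: t' := by
          cases hx : PySem.Chars.splitOn h ['('] with
          | nil => exact absurd hx (splitOn_single_ne_nil _ _)
          | cons x y => exact ⟨x, y, rfl⟩
        rw [hht']
        simp [List.modifyHead]

-- strip facts
lemma strip_cons_space {a : Char} (h : PySem.Chars.isspace a = true) (x : List Char) :
    PySem.Chars.strip (a :: x) = PySem.Chars.strip x := by
  simp [PySem.Chars.strip, PySem.Chars.lstrip, List.dropWhile_cons, h]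

lemma rstrip_append_space {a : Char} (h : PySem.Chars.isspace a = true) (x : List Char) :
    PySem.Chars.rstrip (x ++ [a]) = PySem.Chars.rstrip x := by
  simp [PySem.Chars.rstrip, List.dropWhile_cons, h]

lemma strip_append_space {a : Char} (h : PySem.Chars.isspace a = true) (x : List Char) :
    PySem.Chars.strip (x ++ [a]) = PySem.Chars.strip x := by
  simp only [PySem.Chars.strip, PySem.Chars.lstrip, List.dropWhile_append]
  split
  · rename_i hall
    rw [List.isEmpty_iff] at hall
    simp [h, hall]
  · exact rstrip_append_space h _

lemma modifyLast_cons' {α : Type} (f : α → α) (x : α) (l : List α) (h : l ≠ []) :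
    (x :: l).modifyLast f = x :: l.modifyLast f := by
  have := List.modifyLast_append_of_right_ne_nil f [x] l h
  simpa using this

lemma splitOn_append_nonsep (c a : Char) (h : a ≠ c) (r : List Char) :
    PySem.Chars.splitOn (r ++ [a]) [c] = (PySem.Chars.splitOn r [c]).modifyLast (· ++ [a]) := by
  induction r with
  | nil =>
    simp only [List.nil_append, splitOn_single_cons, if_neg h, splitOn_single_nil]
    rfl
  | cons b rs ih =>
    rw [List.cons_append, splitOn_single_cons, splitOn_single_cons]
    by_cases hbc : b = c
    · rw [if_pos hbc, if_pos hbc, ih,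
        modifyLast_cons' _ _ _ (splitOn_single_ne_nil c rs)]
    · rw [if_neg hbc, if_neg hbc, ih]
      obtain ⟨x, t, hx⟩ : ∃ x t, PySem.Chars.splitOn rs [c] = x :: t := by
        cases hx : PySem.Chars.splitOn rs [c] with
        | nil => exact absurd hx (splitOn_single_ne_nil _ _)
        | cons u v => exact ⟨u, v, rfl⟩
      rw [hx]
      cases t with
      | nil =>
        have e1 : List.modifyLast (· ++ [a]) [x] = [x ++ [a]] := by
          simpa using List.modifyLast_concat (· ++ [a]) x []
        have e2 : List.modifyLast (· ++ [a]) [b :: x] = [(b :: x) ++ [a]] := by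
          simpa using List.modifyLast_concat (· ++ [a]) (b :: x) []
        simp [e1, e2]
      | cons y ts =>
        rw [modifyLast_cons' _ x (y :: ts) (by simp), List.modifyHead, List.modifyHead,
          modifyLast_cons' _ (b :: x) (y :: ts) (by simp)]

lemma map_modifyLast_eq {α β : Type} (f : α → β) (g : α → α) (hfg : ∀ x, f (g x) = f x) :
    ∀ (l : List α), (l.modifyLast g).map f = l.map f := by
  intro l
  induction l with
  | nil => rfl
  | cons x xs ih =>
    cases hxs : xs with
    | nil =>
      have e1 : List.modifyLast g [x] = [g x] := by
        simpa using List.modifyLast_concat g x []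
      simp [e1, hfg]
    | cons y ts =>
      rw [modifyLast_cons' _ _ _ (by simp), List.map_cons, List.map_cons, ← hxs, ih]

lemma map_modifyHead_eq {α β : Type} (f : α → β) (g : α → α) (hfg : ∀ x, f (g x) = f x) :
    ∀ (l : List α), (l.modifyHead g).map f = l.map f := by
  intro l
  cases l with
  | nil => rfl
  | cons x xs => simp [hfg]

lemma isspace_ne_lparen {a : Char} (h : PySem.Chars.isspace a = true) : a ≠ '(' := by
  intro ha; subst ha; simp [PySem.Chars.isspace] at h

-- the per-piece token list A produces from a piece p: split on '(', strip, drop empties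
def T (p : List Char) : List (List Char) :=
  ((PySem.Chars.splitOn p ['(']).map PySem.Chars.strip).filter (fun x => !(x == []))

lemma T_cons_space {a : Char} (h : PySem.Chars.isspace a = true) (p : List Char) : T (a :: p) = T p := by
  unfold T
  rw [splitOn_single_cons, if_neg (isspace_ne_lparen h),
    map_modifyHead_eq _ _ (fun x => strip_cons_space h x)]

lemma T_append_space {a : Char} (h : PySem.Chars.isspace a = true) (p : List Char) : T (p ++ [a]) = T p := by
  unfold T
  rw [splitOn_append_nonsep _ _ (isspace_ne_lparen h),
    map_modifyLast_eq _ _ (fun x => strip_append_space h x)]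

lemma T_lstrip (p : List Char) : T (PySem.Chars.lstrip p) = T p := by
  induction p with
  | nil => rfl
  | cons a r ih =>
    by_cases h : PySem.Chars.isspace a = true
    · rw [show PySem.Chars.lstrip (a :: r) = PySem.Chars.lstrip r by
        simp [PySem.Chars.lstrip, List.dropWhile_cons, h], ih, T_cons_space h]
    · rw [show PySem.Chars.lstrip (a :: r) = a :: r by
        simp [PySem.Chars.lstrip, List.dropWhile_cons, h]]

lemma T_rstrip (p : List Char) : T (PySem.Chars.rstrip p) = T p := by
  induction p using List.reverseRecOn with
  | nil => rfl
  | append_singleton xs x ih =>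
    by_cases h : PySem.Chars.isspace x = true
    · rw [rstrip_append_space h, ih, T_append_space h]
    · rw [show PySem.Chars.rstrip (xs ++ [x]) = xs ++ [x] by
        simp [PySem.Chars.rstrip, List.dropWhile_cons, h]]

lemma T_strip (p : List Char) : T (PySem.Chars.strip p) = T p := by
  rw [PySem.Chars.strip, T_rstrip, T_lstrip]

lemma ofList_ite_ne (y : List Char) (A B : List String) :
    (if String.ofList y ≠ "" then A else B) = (if !(y == []) then A else B) := by
  by_cases h : y = []
  · subst h
    have e : String.ofList ([] : List Char) = "" := rfl
    simp [e]
  · have hne : String.ofList y ≠ "" := by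
      intro hc
      apply h
      have : (String.ofList y).toList = ("" : String).toList := by rw [hc]
      simpa using this
    rw [if_pos hne, if_pos (by simp [h])]

lemma inner_eq (fl : List String) (p : List Char) :
    ((PySem.Chars.splitOn (PySem.Str.strip (String.ofList p)).toList ['(']).map String.ofList).foldl
      (fun fl j =>
        let j := PySem.Str.strip j
        if j ≠ "" then fl ++ [j] else fl) fl
    = fl ++ (T (PySem.Chars.strip p)).map String.ofList := by
  rw [PySem.Str.strip, String.toList_ofList, String.toList_ofList, List.foldl_map]
  simp only [PySem.Str.strip, String.toList_ofList, ofList_ite_ne]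
  rw [PySem.List.foldl_append_if (fun x => !(PySem.Chars.strip x == []))
    (fun x => String.ofList (PySem.Chars.strip x))]
  simp [T, List.filter_map, List.map_map, Function.comp_def]

-- the canonical value both ports compute: split s at every parenthesis, strip, drop empties
def canon (s : List Char) : List String :=
  ((((SB s).map PySem.Chars.strip).filter (fun x => !(x == []))).map String.ofList)

lemma fixParen_eq_canon (s : String) : fixParen s = canon s.toList := by
  unfold fixParen
  rw [List.foldl_map]
  simp only [inner_eq, T_strip]
  rw [PySem.List.foldl_append_eq_flatMap (fun p => (T p).map String.ofList)]
  simp only [List.nil_append]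
  rw [← List.map_flatMap]
  unfold canon T
  rw [← List.filter_flatMap, ← List.map_flatMap, flatMap_split_eq_SB]

lemma flushTok_eq (fl : List String) (buf : String) :
    flushTok fl buf = fl ++ (if !(PySem.Chars.strip buf.toList == []) then [String.ofList (PySem.Chars.strip buf.toList)] else []) := by
  unfold flushTok
  rw [PySem.Str.strip, ofList_ite_ne]
  split <;> simp

lemma alt_loop (l : List Char) : ∀ (acc : List String) (buf : String),
    (let st := l.foldl
      (fun (st : List String × String) ch =>
        if ch = '(' ∨ ch = ')' then (flushTok st.1 st.2, "") else (st.1, st.2.push ch))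
      (acc, buf)
     flushTok st.1 st.2)
    = acc ++ ((((SB l).modifyHead (buf.toList ++ ·)).map PySem.Chars.strip).filter (fun x => !(x == []))).map String.ofList := by
  induction l with
  | nil =>
    intro acc buf
    simp only [List.foldl_nil, SB]
    rw [flushTok_eq]
    by_cases hb : PySem.Chars.strip buf.toList = [] <;> simp [List.modifyHead, hb]
  | cons a r ih =>
    intro acc buf
    simp only [List.foldl_cons]
    by_cases h : a = '(' ∨ a = ')'
    · rw [if_pos h]
      show (let st := r.foldl _ (flushTok acc buf, ""); flushTok st.1 st.2) = _
      rw [ih (flushTok acc buf) "", flushTok_eq]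
      have e0 : ("" : String).toList = [] := rfl
      have eid : (SB r).modifyHead (([] : List Char) ++ ·) = SB r := by
        cases SB r <;> simp
      rw [e0, eid]
      simp only [SB, if_pos h]
      obtain ⟨x, t, hx⟩ : ∃ x t, SB r = x :: t := by
        cases hx : SB r with
        | nil => exact absurd hx (SB_ne_nil r)
        | cons u v => exact ⟨u, v, rfl⟩
      simp only [List.modifyHead, List.map_cons, List.filter_cons]
      simp [hx]
      split <;> simp
    · rw [if_neg h]
      show (let st := r.foldl _ (acc, buf.push a); flushTok st.1 st.2) = _
      rw [ih acc (buf.push a)]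
      have hSB : SB (a :: r) = (SB r).modifyHead (a :: ·) := by
        simp [SB, h]
      rw [hSB, List.modifyHead_modifyHead, String.toList_push]
      have ec : ((fun x => buf.toList ++ x) ∘ (fun x => a :: x)) = (fun x => (buf.toList ++ [a]) ++ x) := by
        funext x; simp
      rw [ec]

lemma fixParen_alt_eq_canon (s : String) : fixParen_alt s = canon s.toList := by
  unfold fixParen_alt
  rw [alt_loop s.toList [] ""]
  have eid : (SB s.toList).modifyHead (("" : String).toList ++ ·) = SB s.toList := by
    cases SB s.toList <;> simp
  rw [eid]
  rfl

-- ===== VERDICT (by name: the statement is the Claim_ definition above) =====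
theorem fixParen_spec : Claim_equal_fixParen := by
  intro s _
  unfold Spec_fixParen
  rw [fixParen_eq_canon, fixParen_alt_eq_canon]
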